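-- pv_equiv track=rewrite | github.com/dinkoslav/Python | Programing0-1/Week4/2-Hash-Them/hash_them.py | hash_them
-- ===== SOURCE A (Python) =====
-- def hash_them(keys, values):
--     dict = {}
--     count = 0
--     for key in keys:
--         if  count <= (len(values) - 1):
--             dict[key] = values[count]
--         else:
--             dict[key] = "None"
--         count = count + 1
--     return dict
-- ===== SOURCE B (Python) =====
-- def hash_them(keys, values):
--     ks = list(keys)
--     result = dict(zip(ks, values))
--     for key in ks[len(values):]:
--         result[key] = "None"
--     return result
-- ===== Notes on version B (the rewrite author's own statement) =====
-- stated objective: idiomatic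
-- what changed: Replaces the single indexed loop with an inner bounds branch by dict(zip(...)) for the matched prefix plus a separate tail loop assigning the "None" default to the overflow keys.
import Mathlib
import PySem

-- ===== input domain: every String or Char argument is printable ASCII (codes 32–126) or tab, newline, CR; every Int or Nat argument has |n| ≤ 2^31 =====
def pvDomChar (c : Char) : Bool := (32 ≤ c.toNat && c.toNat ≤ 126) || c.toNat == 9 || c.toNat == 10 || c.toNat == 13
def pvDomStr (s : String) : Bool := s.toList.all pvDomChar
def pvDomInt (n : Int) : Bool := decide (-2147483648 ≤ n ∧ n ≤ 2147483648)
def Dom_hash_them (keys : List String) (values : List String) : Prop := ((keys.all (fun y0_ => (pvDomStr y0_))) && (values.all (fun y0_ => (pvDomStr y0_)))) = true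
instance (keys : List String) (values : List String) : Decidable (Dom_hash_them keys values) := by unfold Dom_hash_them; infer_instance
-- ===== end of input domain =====

-- B builds the dict via zip for the matched prefix plus a separate tail loop for the "None" defaults (idiomatic decomposition; same cost).

-- ===== PORT A =====
-- one indexed loop: dict[key] = values[count] if count in range else "None"
def hash_them (keys : List String) (values : List String) : List (String × String) :=
  (keys.foldl
    (fun (st : PySem.Dict String String × Int) key =>
      (if st.2 ≤ (values.length : Int) - 1 then
         st.1.insert key ((PySem.List.pyGet? values st.2).getD "")
       else
         st.1.insert key "None",
       st.2 + 1))
    (PySem.Dict.empty, 0)).1.items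

-- ===== PORT B =====
-- dict(zip(ks, values)), then overflow keys ks[len(values):] get "None"
def hash_them_alt (keys : List String) (values : List String) : List (String × String) :=
  let ks := keys
  let result := (ks.zip values).foldl (fun d p => d.insert p.1 p.2) PySem.Dict.empty
  ((ks.drop values.length).foldl (fun d k => d.insert k "None") result).items

-- ===== PRECONDITION & SPEC =====
def Spec_hash_them (keys : List String) (values : List String) (out : List (String × String)) : Prop := out = hash_them_alt keys values
instance (keys : List String) (values : List String) (out : List (String × String)) : Decidable (Spec_hash_them keys values out) := by unfold Spec_hash_them; infer_instance

-- ===== CLAIM (what is proved, stated in full; the proofs are below) =====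
def Claim_equal_hash_them : Prop := ∀ (keys : List String) (values : List String), Dom_hash_them keys values → Spec_hash_them keys values (hash_them keys values)

-- ===== LEMMAS AND PROOFS =====

-- A's counted loop, started at count = c, equals B's two-pass shape on the remaining values.
theorem hash_loopA_eq (keys values : List String) (c : Nat) (d : PySem.Dict String String) :
    (keys.foldl
      (fun (st : PySem.Dict String String × Int) key =>
        (if st.2 ≤ (values.length : Int) - 1 then
           st.1.insert key ((PySem.List.pyGet? values st.2).getD "")
         else
           st.1.insert key "None",
         st.2 + 1))
      (d, (c : Int))).1
    = (keys.drop (values.length - c)).foldl (fun d k => d.insert k "None")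
        ((keys.zip (values.drop c)).foldl (fun d p => d.insert p.1 p.2) d) := by
  induction keys generalizing c d with
  | nil => simp
  | cons k ks ih =>
    by_cases hc : c < values.length
    · have hguard : (c : Int) ≤ (values.length : Int) - 1 := by omega
      have hget : (PySem.List.pyGet? values (c : Int)).getD "" = values[c]'hc := by
        simp [hc]
      have hdrop : values.drop c = values[c]'hc :: values.drop (c + 1) :=
        List.drop_eq_getElem_cons hc
      have hsub : values.length - c = (values.length - (c + 1)) + 1 := by omega
      have hcast : ((c : Int) + 1) = ((c + 1 : Nat) : Int) := by push_cast; ring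
      simp only [List.foldl_cons, hguard, if_pos, hget, hdrop, List.zip_cons_cons, hsub,
        List.drop_succ_cons, hcast]
      exact ih (c + 1) (d.insert k (values[c]'hc))
    · have hguard : ¬ ((c : Int) ≤ (values.length : Int) - 1) := by omega
      have hdrop : values.drop c = [] := List.drop_eq_nil_of_le (by omega)
      have hdrop1 : values.drop (c + 1) = [] := List.drop_eq_nil_of_le (by omega)
      have hsub : values.length - c = 0 := by omega
      have hsub1 : values.length - (c + 1) = 0 := by omega
      have hcast : ((c : Int) + 1) = ((c + 1 : Nat) : Int) := by push_cast; ring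
      simp only [List.foldl_cons, hguard, if_neg, not_false_iff, hdrop, hsub, List.zip_nil_right,
        List.drop_zero, hcast]
      have := ih (c + 1) (d.insert k "None")
      simpa [hdrop1, hsub1] using this

-- ===== VERDICT (by name: the statement is the Claim_ definition above) =====
theorem hash_them_spec : Claim_equal_hash_them := by
  intro keys values _
  unfold Spec_hash_them hash_them hash_them_alt
  have h := hash_loopA_eq keys values 0 PySem.Dict.empty
  simp only [Nat.cast_zero, Nat.sub_zero, List.drop_zero] at h
  rw [h]
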